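-- pv_equiv track=rewrite | github.com/harvardinformatics/GenomeAnnotation | PerformanceMetrics/utilities/BuildProteinCodingGeneCdsFusionSummaryTable.py | gene_nested_test
-- ===== SOURCE A (Python) =====
-- def gene_nested_test(newgene,geneset):
--     test = False
--     for gene in geneset:
--         if newgene in gene:
--             test = True
--     if test == True:
--         return geneset
--     else:
--         removes = []
--         for gene in geneset:
--             if gene in newgene:
--                 removes.append(gene)
--         for gene in removes:
--             geneset.remove(gene)
--         geneset.add(newgene)
--         return geneset
-- ===== SOURCE B (Python) =====
-- def gene_nested_test(newgene, geneset):
--     # Return-value equivalent to A; unlike A it does not mutate geneset in place,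
--     # it returns a fresh set in the rebuild case.
--     for gene in geneset:
--         if newgene in gene:
--             return geneset
--     kept = {gene for gene in geneset if gene not in newgene}
--     kept.add(newgene)
--     return kept
-- ===== Notes on version B (the rewrite author's own statement) =====
-- stated objective: simpler
-- what changed: Replaces A's flag loop plus collect-removes-then-mutate-in-place sequence with an early-return superstring scan and a single set comprehension that keeps the non-substring genes directly (no removes list, no in-place removal).
import Mathlib
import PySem

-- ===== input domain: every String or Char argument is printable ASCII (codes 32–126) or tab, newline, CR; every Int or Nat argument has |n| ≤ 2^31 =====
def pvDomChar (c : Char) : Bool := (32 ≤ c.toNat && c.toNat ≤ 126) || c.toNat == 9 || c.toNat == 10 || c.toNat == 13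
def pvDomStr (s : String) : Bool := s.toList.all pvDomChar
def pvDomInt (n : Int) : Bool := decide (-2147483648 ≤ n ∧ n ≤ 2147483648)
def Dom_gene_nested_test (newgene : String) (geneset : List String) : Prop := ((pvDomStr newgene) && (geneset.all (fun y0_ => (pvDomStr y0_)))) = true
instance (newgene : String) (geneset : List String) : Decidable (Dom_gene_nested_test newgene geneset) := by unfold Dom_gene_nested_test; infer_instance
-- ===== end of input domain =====

-- B replaces A's flag loop + collect-removes + in-place set mutation by an early-return
-- superstring scan and one comprehension keeping the non-substring genes (simpler; the
-- equivalence proved is about the RETURN value — B does not mutate geneset in place).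

-- ===== PORT A =====
-- The '.getD gs' totalises Python's geneset.remove(gene) (KeyError = none); every removed
-- gene is a member of the set at removal time, so the fallback is unreachable on set inputs.
def gene_nested_test (newgene : String) (geneset : List String) : List String :=
  let test := geneset.foldl (fun test gene => if PySem.Str.isIn newgene gene then true else test) false
  if test = true then
    geneset
  else
    let removes := geneset.foldl (fun removes gene => if PySem.Str.isIn gene newgene then removes ++ [gene] else removes) []
    let geneset1 := removes.foldl (fun gs gene => (PySem.Set.remove? gs gene).getD gs) geneset
    PySem.Set.add geneset1 newgene

-- ===== PORT B =====
def gene_nested_test_alt (newgene : String) (geneset : List String) : List String :=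
  if geneset.any (fun gene => PySem.Str.isIn newgene gene) then
    geneset
  else
    PySem.Set.add (geneset.filter (fun gene => !PySem.Str.isIn gene newgene)) newgene

-- ===== PRECONDITION & SPEC =====
def Spec_gene_nested_test (newgene : String) (geneset : List String) (out : List String) : Prop := out = gene_nested_test_alt newgene geneset
instance (newgene : String) (geneset : List String) (out : List String) : Decidable (Spec_gene_nested_test newgene geneset out) := by unfold Spec_gene_nested_test; infer_instance

-- ===== CLAIM (what is proved, stated in full; the proofs are below) =====
def Claim_equal_gene_nested_test : Prop := ∀ (newgene : String) (geneset : List String), Dom_gene_nested_test newgene geneset → Spec_gene_nested_test newgene geneset (gene_nested_test newgene geneset)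

-- ===== LEMMAS AND PROOFS =====

-- A's Boolean-flag loop computes List.any.
lemma flag_foldl_eq_any (p : String → Bool) (gs : List String) (b : Bool) :
    gs.foldl (fun t g => if p g then true else t) b = (b || gs.any p) := by
  induction gs generalizing b with
  | nil => simp
  | cons a t ih =>
      simp only [List.foldl_cons, List.any_cons, ih]
      cases p a <;> simp

-- Python set.remove, totalised with getD, is a filter (identity when absent).
lemma removeD_eq_filter (acc : List String) (g : String) :
    (PySem.Set.remove? acc g).getD acc = acc.filter (fun y => !(y == g)) := by
  by_cases h : g ∈ acc
  · simp [PySem.Set.remove?, PySem.Set.discard, h]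
  · have hc : ¬ PySem.Set.contains acc g = true := by
      rw [PySem.Set.contains_iff]; exact h
    simp only [PySem.Set.remove?, if_neg hc, Option.getD_none]
    refine (List.filter_eq_self.mpr ?_).symm
    intro y hy
    have : y ≠ g := fun hEq => h (hEq ▸ hy)
    simp [this]

-- Folding those filters over the removal list filters out its members.
lemma foldl_filter_step (rs gs : List String) :
    rs.foldl (fun acc g => acc.filter (fun y => !(y == g))) gs
      = gs.filter (fun y => !(rs.contains y)) := by
  induction rs generalizing gs with
  | nil => simp
  | cons r t ih =>
      simp only [List.foldl_cons, ih, List.filter_filter]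
      refine List.filter_congr ?_
      intro y _
      simp only [List.contains_cons]
      by_cases hyr : y = r <;> simp [hyr, Bool.and_comm]

-- ===== VERDICT (by name: the statement is the Claim_ definition above) =====
theorem gene_nested_test_spec : Claim_equal_gene_nested_test := by
  intro newgene geneset _
  unfold Spec_gene_nested_test gene_nested_test gene_nested_test_alt
  rw [flag_foldl_eq_any]
  simp only [Bool.false_or]
  by_cases h : (geneset.any (fun gene => PySem.Str.isIn newgene gene)) = true
  · rw [if_pos h, if_pos h]
  · rw [if_neg h, if_neg h]
    rw [PySem.List.foldl_append_if (fun gene => PySem.Str.isIn gene newgene) (fun x => x) geneset []]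
    simp only [List.nil_append]
    congr 1
    simp only [removeD_eq_filter]
    rw [foldl_filter_step]
    refine List.filter_congr ?_
    intro y hy
    by_cases hp : PySem.Str.isIn y newgene = true
    · simp only [PySem.Str.isIn_eq] at hp
      simp [List.mem_filter, hy, hp]
    · simp only [Bool.not_eq_true, PySem.Str.isIn_eq] at hp
      simp [List.mem_filter, hp]
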